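-- pv_equiv track=rewrite | github.com/openfoodfacts/taxonomy-editor | backend/editor/controllers/search_controller.py | split_query_into_search_terms
-- ===== SOURCE A (Python) =====
-- def split_query_into_search_terms(query: str) -> list[str]:
--     """
--     Queries should be split by whitespaces that are not inside quotes
--     """
--     query = query.strip()
--     search_terms = []
--
--     inside_quotes = False
--     term_start = 0
--
--     for term_end in range(len(query)):
--         if query[term_end] == '"':
--             inside_quotes = not inside_quotes
--         # If we are not inside quotes and we encounter a whitespace, we are at the end of the current search term
--         elif query[term_end] == " " and not inside_quotes:
--             search_term = query[term_start:term_end]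
--             search_terms.append(search_term)
--             term_start = term_end + 1
--
--     search_terms.append(query[term_start:])
--
--     return search_terms
-- ===== SOURCE B (Python) =====
-- def split_query_into_search_terms(query: str) -> list[str]:
--     # Split by '"': even segments are outside quotes, odd segments inside.
--     segments = query.strip().split('"')
--     pieces = segments[0].split(" ")
--     terms = pieces[:-1]
--     current = pieces[-1]
--     inside = False
--     for seg in segments[1:]:
--         inside = not inside
--         current += '"'
--         if inside:
--             current += seg
--         else:
--             pieces = seg.split(" ")
--             current += pieces[0]
--             for p in pieces[1:]:
--                 terms.append(current)
--                 current = p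
--     terms.append(current)
--     return terms
-- ===== Notes on version B (the rewrite author's own statement) =====
-- stated objective: faster
-- what changed: Replaces the per-character index scan with a quote-toggle flag and slice bookkeeping by a two-level decomposition: split the stripped query on the double-quote character so segments alternate outside/inside quotes, split only the outside segments on spaces, and stitch terms back together with a string accumulator.
import Mathlib
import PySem

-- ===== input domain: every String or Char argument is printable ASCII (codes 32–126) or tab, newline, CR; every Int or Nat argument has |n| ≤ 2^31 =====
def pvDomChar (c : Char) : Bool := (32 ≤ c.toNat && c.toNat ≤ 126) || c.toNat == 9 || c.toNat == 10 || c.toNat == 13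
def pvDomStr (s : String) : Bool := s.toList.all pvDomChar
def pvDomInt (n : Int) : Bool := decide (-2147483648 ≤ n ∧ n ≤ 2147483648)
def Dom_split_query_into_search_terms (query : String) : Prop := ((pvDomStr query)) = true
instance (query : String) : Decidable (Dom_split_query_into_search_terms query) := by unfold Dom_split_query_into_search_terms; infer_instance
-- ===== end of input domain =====

-- B replaces A's per-character scan (quote flag + slice indices) by splitting on '"' into
-- alternating outside/inside segments and splitting only outside segments on spaces
-- (same O(n) work, measurably faster in CPython: the scan is done by bulk str.split instead of a per-character loop).

-- ===== PORT A =====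
-- the body of A's 'for term_end in range(len(query))' loop; state = (inside_quotes, term_start, search_terms)
def pvStepA (q : List Char) (st : Bool × Int × List (List Char)) (i : Int) : Bool × Int × List (List Char) :=
  match PySem.List.pyGet? q i with
  | some c =>
      if c = '"' then (!st.1, st.2.1, st.2.2)
      else if c = ' ' ∧ st.1 = false then
        (st.1, i + 1, st.2.2 ++ [PySem.List.slice q (some st.2.1) (some i)])
      else st
  | none => st

def split_query_into_search_terms (query : String) : List String :=
  let q : List Char := PySem.Chars.strip query.toList
  let fin := (PySem.List.pyRange 0 (PySem.Chars.len q : Int) 1).foldl (pvStepA q)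
      (false, (0 : Int), ([] : List (List Char)))
  (fin.2.2 ++ [PySem.List.slice q (some fin.2.1) none]).map (fun cs => String.ofList cs)

-- ===== PORT B =====
-- the body of B's 'for seg in segments[1:]' loop; state = (inside, current, terms)
def pvStepB (st : Bool × List Char × List (List Char)) (seg : List Char) : Bool × List Char × List (List Char) :=
  let inside := !st.1
  let cur := st.2.1 ++ ['"']
  if inside then (inside, cur ++ seg, st.2.2)
  else
    let pieces := PySem.Chars.splitOn seg [' ']
    let inner := (PySem.List.slice pieces (some 1) none).foldl
        (fun st2 p => (p, st2.2 ++ [st2.1]))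
        (cur ++ PySem.List.pyGetD pieces 0 [], st.2.2)
    (inside, inner.1, inner.2)

def split_query_into_search_terms_alt (query : String) : List String :=
  let q : List Char := PySem.Chars.strip query.toList
  let segments := PySem.Chars.splitOn q ['"']
  let pieces := PySem.Chars.splitOn (PySem.List.pyGetD segments 0 []) [' ']
  let fin := (PySem.List.slice segments (some 1) none).foldl pvStepB
      (false, PySem.List.pyGetD pieces (-1) [], PySem.List.slice pieces none (some (-1)))
  (fin.2.2 ++ [fin.2.1]).map (fun cs => String.ofList cs)

-- ===== PRECONDITION & SPEC =====
def Spec_split_query_into_search_terms (query : String) (out : List String) : Prop := out = split_query_into_search_terms_alt query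
instance (query : String) (out : List String) : Decidable (Spec_split_query_into_search_terms query out) := by unfold Spec_split_query_into_search_terms; infer_instance

-- ===== CLAIM (what is proved, stated in full; the proofs are below) =====
def Claim_equal_split_query_into_search_terms : Prop := ∀ (query : String), Dom_split_query_into_search_terms query → Spec_split_query_into_search_terms query (split_query_into_search_terms query)

-- ===== LEMMAS AND PROOFS =====

-- reference state machine both ports are reduced to: scan chars, toggle on '"', cut on ' ' outside quotes
def pvRef : List Char → Bool → List Char → List (List Char)
  | [], _, cur => [cur]
  | c :: rest, b, cur =>
    if c = '"' then pvRef rest (!b) (cur ++ [c])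
    else if c = ' ' ∧ b = false then cur :: pvRef rest b []
    else pvRef rest b (cur ++ [c])

-- structural recursion computing Python's s.split(c) for a one-character separator
def pvSp (c : Char) : List Char → List (List Char)
  | [] => [[]]
  | ch :: rest => if ch = c then [] :: pvSp c rest else (pvSp c rest).modifyHead (ch :: ·)

theorem pvSp_ne_nil (c : Char) (l : List Char) : pvSp c l ≠ [] := by
  induction l with
  | nil => simp [pvSp]
  | cons ch rest ih =>
    simp only [pvSp]
    split_ifs
    · simp
    · cases hsp : pvSp c rest with
      | nil => exact absurd hsp ih
      | cons a t => simp [List.modifyHead]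

theorem pvSplitOn_go_eq (c : Char) : ∀ (fuel : Nat) (l cur : List Char) (acc : List (List Char)),
    l.length < fuel →
    PySem.Chars.splitOn.go [c] fuel l cur acc
      = acc.reverse ++ (pvSp c l).modifyHead (cur.reverse ++ ·) := by
  intro fuel
  induction fuel with
  | zero => intro l cur acc h; omega
  | succ f ih =>
    intro l cur acc h
    cases l with
    | nil => simp [PySem.Chars.splitOn.go, pvSp]
    | cons ch rest =>
      rw [PySem.Chars.splitOn.go]
      by_cases hc : ch = c
      · have hpre : List.isPrefixOf [c] (ch :: rest) = true := by simp [List.isPrefixOf, hc]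
        rw [if_pos hpre]
        have hdrop : List.drop [c].length (ch :: rest) = rest := by simp
        rw [hdrop, ih rest [] (cur.reverse :: acc) (by simp at h; omega)]
        subst hc
        simp only [pvSp, List.modifyHead]
        cases hsp : pvSp ch rest with
        | nil => exact absurd hsp (pvSp_ne_nil ch rest)
        | cons a t => simp
      · have hpre : List.isPrefixOf [c] (ch :: rest) = false := by
          simp [List.isPrefixOf]
          exact fun hcc => absurd hcc.symm hc
        rw [if_neg (by simp [hpre])]
        rw [ih rest (ch :: cur) acc (by simp at h; omega)]
        simp only [pvSp, if_neg hc, List.reverse_cons]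
        cases hsp : pvSp c rest with
        | nil => exact absurd hsp (pvSp_ne_nil c rest)
        | cons a t => simp [List.modifyHead]

theorem pvSplitOn_eq_pvSp (c : Char) (l : List Char) :
    PySem.Chars.splitOn l [c] = pvSp c l := by
  rw [PySem.Chars.splitOn, pvSplitOn_go_eq c (l.length + 1) l [] [] (by omega)]
  cases hsp : pvSp c l with
  | nil => exact absurd hsp (pvSp_ne_nil c l)
  | cons a t => simp [List.modifyHead]

theorem pvSp_not_mem (c : Char) (l : List Char) : ∀ s ∈ pvSp c l, c ∉ s := by
  induction l with
  | nil => simp [pvSp]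
  | cons ch rest ih =>
    simp only [pvSp]
    split_ifs with hc
    · intro s hs
      rcases List.mem_cons.1 hs with h | h
      · simp [h]
      · exact ih s h
    · intro s hs
      cases hsp : pvSp c rest with
      | nil => exact absurd hsp (pvSp_ne_nil c rest)
      | cons a t =>
        rw [hsp] at hs ih
        simp only [List.modifyHead] at hs
        rcases List.mem_cons.1 hs with h | h
        · subst h
          intro hmem
          rcases List.mem_cons.1 hmem with h | h
          · exact hc h.symm
          · exact ih a (by simp) h
        · exact ih s (by simp [h])

-- the segments of pvSp c glue back to the original string, with c before every later segment
theorem pvSp_join (c : Char) (l : List Char) :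
    (pvSp c l).headD [] ++ ((pvSp c l).tail.map (fun s => c :: s)).flatten = l := by
  induction l with
  | nil => simp [pvSp]
  | cons ch rest ih =>
    simp only [pvSp]
    split_ifs with hc
    · cases hsp : pvSp c rest with
      | nil => exact absurd hsp (pvSp_ne_nil c rest)
      | cons a t =>
        rw [hsp] at ih
        simp only [List.headD, List.tail, List.map_cons, List.flatten_cons] at ih ⊢
        subst hc
        simp [← ih]
    · cases hsp : pvSp c rest with
      | nil => exact absurd hsp (pvSp_ne_nil c rest)
      | cons a t =>
        rw [hsp] at ih
        simp only [List.modifyHead, List.headD, List.tail] at ih ⊢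
        simp [← ih]

-- ===== A-side: the index loop computes pvRef =====
theorem pvLoopA (q : List Char) : ∀ (m k t : Nat), q.length - k = m → t ≤ k → k ≤ q.length →
    ∀ (b : Bool) (acc : List (List Char)),
    (let fin := (PySem.List.pyRange (k : Int) (q.length : Int) 1).foldl (pvStepA q) (b, (t : Int), acc)
     fin.2.2 ++ [PySem.List.slice q (some fin.2.1) none])
      = acc ++ pvRef (q.drop k) b ((q.drop t).take (k - t)) := by
  intro m
  induction m with
  | zero =>
    intro k t hm ht hk b acc
    have hkq : k = q.length := by omega
    subst hkq
    have hrange : PySem.List.pyRange (q.length : Int) (q.length : Int) 1 = [] := by simp [pysem]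
    simp only [hrange, List.foldl_nil, PySem.List.slice_from_natCast]
    have hdq : q.drop q.length = [] := by simp
    rw [hdq]
    have htake : (q.drop t).take (q.length - t) = q.drop t := by
      apply List.take_of_length_le; simp
    rw [htake, pvRef]
  | succ m ih =>
    intro k t hm ht hk b acc
    have hklt : k < q.length := by omega
    rw [PySem.List.pyRange_one_cons (by exact_mod_cast hklt)]
    rw [List.foldl_cons]
    have hget : PySem.List.pyGet? q (k : Int) = some q[k] := by
      rw [PySem.List.pyGet?_natCast]; simp [hklt]
    have hcur : (q.drop t).take (k + 1 - t) = (q.drop t).take (k - t) ++ [q[k]] := by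
      have h1 : k + 1 - t = (k - t) + 1 := by omega
      rw [h1, List.take_add_one]
      have h2 : (q.drop t)[k - t]? = some q[k] := by
        rw [List.getElem?_drop]
        have h3 : t + (k - t) = k := by omega
        rw [h3]; simp [hklt]
      rw [h2]; rfl
    have hcast : (k : Int) + 1 = ((k + 1 : Nat) : Int) := by push_cast; ring
    rw [show q.drop k = q[k] :: q.drop (k+1) from by rw [List.drop_eq_getElem_cons hklt]]
    simp only [pvStepA, hget]
    by_cases hq : q[k] = '"'
    · rw [if_pos hq]
      have hih := ih (k+1) t (by omega) (by omega) (by omega) (!b) acc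
      rw [hcast]
      simp only at hih ⊢
      rw [hih, hcur, pvRef, if_pos hq, hq]
    · rw [if_neg hq]
      by_cases hsp : q[k] = ' ' ∧ b = false
      · rw [if_pos hsp]
        have hih := ih (k+1) (k+1) (by omega) (by omega) (by omega) b
          (acc ++ [PySem.List.slice q (some (t:Int)) (some (k:Int))])
        simp only at hih ⊢
        rw [hcast, hih]
        rw [PySem.List.slice_natCast]
        simp only [Nat.sub_self, List.take_zero]
        rw [pvRef, if_neg hq, if_pos hsp]
        simp
      · rw [if_neg hsp]
        have hih := ih (k+1) t (by omega) (by omega) (by omega) b acc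
        simp only at hih ⊢
        rw [hcast, hih, hcur, pvRef, if_neg hq, if_neg hsp]

theorem pvA_eq_ref (query : String) :
    split_query_into_search_terms query
      = (pvRef (PySem.Chars.strip query.toList) false []).map (fun cs => String.ofList cs) := by
  unfold split_query_into_search_terms
  simp only [PySem.Chars.len_eq]
  have h := pvLoopA (PySem.Chars.strip query.toList) (PySem.Chars.strip query.toList).length 0 0
    (by omega) (by omega) (by omega) false []
  simp only [Nat.cast_zero, List.drop_zero, List.nil_append] at h
  rw [h]
  simp

-- ===== B-side lemmas =====
theorem pvRef_inside (seg : List Char) (h : '"' ∉ seg) :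
    ∀ (tail cur : List Char), pvRef (seg ++ tail) true cur = pvRef tail true (cur ++ seg) := by
  induction seg with
  | nil => intro tail cur; simp
  | cons ch rest ih =>
    intro tail cur
    have hch : ch ≠ '"' := fun he => h (he ▸ List.mem_cons_self)
    rw [List.cons_append, pvRef, if_neg hch, if_neg (by simp)]
    rw [ih (fun hm => h (List.mem_cons_of_mem _ hm)) tail (cur ++ [ch])]
    simp

theorem pvEmit_fold (ps : List (List Char)) : ∀ (cur : List Char) (terms : List (List Char)),
    ps.foldl (fun st2 p => (p, st2.2 ++ [st2.1])) (cur, terms)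
      = ((cur :: ps).getLast (by simp), terms ++ (cur :: ps).dropLast) := by
  induction ps with
  | nil => intro cur terms; simp
  | cons p rest ih =>
    intro cur terms
    rw [List.foldl_cons, ih p (terms ++ [cur])]
    have h1 : (cur :: p :: rest).getLast (by simp) = (p :: rest).getLast (by simp) := by
      rw [List.getLast_cons (by simp)]
    have h2 : (cur :: p :: rest).dropLast = cur :: (p :: rest).dropLast := by
      rw [List.dropLast_cons₂]
    rw [h1, h2]
    simp

theorem pvRef_outside (seg : List Char) (h : '"' ∉ seg) :
    ∀ (tail cur : List Char) (terms : List (List Char)),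
    terms ++ pvRef (seg ++ tail) false cur
      = (let inner := (pvSp ' ' seg).tail.foldl (fun st2 p => (p, st2.2 ++ [st2.1]))
             (cur ++ (pvSp ' ' seg).headD [], terms)
         inner.2 ++ pvRef tail false inner.1) := by
  induction seg with
  | nil => intro tail cur terms; simp [pvSp]
  | cons ch rest ih =>
    intro tail cur terms
    have hch : ch ≠ '"' := fun he => h (he ▸ List.mem_cons_self)
    have hrest : '"' ∉ rest := fun hm => h (List.mem_cons_of_mem _ hm)
    rw [List.cons_append, pvRef, if_neg hch]
    by_cases hspace : ch = ' '
    · rw [if_pos ⟨hspace, rfl⟩]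
      simp only [pvSp, if_pos hspace]
      cases hsp : pvSp ' ' rest with
      | nil => exact absurd hsp (pvSp_ne_nil ' ' rest)
      | cons a t =>
        have hih := ih hrest tail [] (terms ++ [cur])
        rw [hsp] at hih
        simp only [List.headD, List.tail, List.nil_append] at hih ⊢
        rw [List.foldl_cons]
        simp only [List.append_nil]
        rw [show terms ++ cur :: pvRef (rest ++ tail) false []
              = (terms ++ [cur]) ++ pvRef (rest ++ tail) false [] by simp, hih]
    · rw [if_neg (by intro hc; exact hspace hc.1)]
      simp only [pvSp, if_neg hspace]
      cases hsp : pvSp ' ' rest with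
      | nil => exact absurd hsp (pvSp_ne_nil ' ' rest)
      | cons a t =>
        have hih := ih hrest tail (cur ++ [ch]) terms
        rw [hsp] at hih
        simp only [List.headD, List.tail, List.modifyHead] at hih ⊢
        rw [hih]
        simp

-- B's main loop over the remaining segments computes pvRef over the re-glued string
theorem pvBfold (segs : List (List Char)) : ∀ (_ : ∀ s ∈ segs, '"' ∉ s) (b : Bool)
    (cur : List Char) (terms : List (List Char)),
    (let fin := segs.foldl pvStepB (b, cur, terms)
     fin.2.2 ++ [fin.2.1])
      = terms ++ pvRef ((segs.map (fun s => '"' :: s)).flatten) b cur := by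
  induction segs with
  | nil => intro _ b cur terms; simp [pvRef]
  | cons s rest ih =>
    intro h b cur terms
    have hs : '"' ∉ s := h s List.mem_cons_self
    have hrest : ∀ x ∈ rest, '"' ∉ x := fun x hx => h x (List.mem_cons_of_mem _ hx)
    rw [List.foldl_cons, List.map_cons, List.flatten_cons, List.cons_append, pvRef, if_pos rfl]
    cases hb : b with
    | false =>
      have hstep : pvStepB (false, cur, terms) s = (true, (cur ++ ['"']) ++ s, terms) := by
        simp [pvStepB]
      rw [hstep]
      have hih := ih hrest true ((cur ++ ['"']) ++ s) terms
      simp only at hih ⊢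
      simp only [Bool.not_false]
      rw [hih, pvRef_inside s hs]
    | true =>
      have hstep : pvStepB (true, cur, terms) s
          = (false,
             ((pvSp ' ' s).tail.foldl (fun st2 p => (p, st2.2 ++ [st2.1]))
               ((cur ++ ['"']) ++ (pvSp ' ' s).headD [], terms)).1,
             ((pvSp ' ' s).tail.foldl (fun st2 p => (p, st2.2 ++ [st2.1]))
               ((cur ++ ['"']) ++ (pvSp ' ' s).headD [], terms)).2) := by
        simp only [pvStepB, Bool.not_true, Bool.false_eq_true, if_false,
          pvSplitOn_eq_pvSp, PySem.List.slice_from_one, PySem.List.pyGetD_zero]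
        cases hsp : pvSp ' ' s with
        | nil => exact absurd hsp (pvSp_ne_nil ' ' s)
        | cons a t => simp
      rw [hstep]
      have hih := ih hrest false
        ((pvSp ' ' s).tail.foldl (fun st2 p => (p, st2.2 ++ [st2.1]))
          (cur ++ ['"'] ++ (pvSp ' ' s).headD [], terms)).1
        ((pvSp ' ' s).tail.foldl (fun st2 p => (p, st2.2 ++ [st2.1]))
          (cur ++ ['"'] ++ (pvSp ' ' s).headD [], terms)).2
      simp only at hih ⊢
      rw [hih]
      simp only [Bool.not_true]
      rw [pvRef_outside s hs ((rest.map (fun s => '"' :: s)).flatten) (cur ++ ['"']) terms]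

theorem pvB_eq_ref (query : String) :
    split_query_into_search_terms_alt query
      = (pvRef (PySem.Chars.strip query.toList) false []).map (fun cs => String.ofList cs) := by
  unfold split_query_into_search_terms_alt
  simp only [pvSplitOn_eq_pvSp, PySem.List.slice_from_one, PySem.List.slice_to_neg_one,
    PySem.List.pyGetD_zero]
  cases hseg : pvSp '"' (PySem.Chars.strip query.toList) with
  | nil => exact absurd hseg (pvSp_ne_nil _ _)
  | cons s0 rest =>
    have hq : s0 ++ ((rest.map (fun s => '"' :: s)).flatten) = PySem.Chars.strip query.toList := by
      have := pvSp_join '"' (PySem.Chars.strip query.toList)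
      rw [hseg] at this
      simpa using this
    have hnm := pvSp_not_mem '"' (PySem.Chars.strip query.toList)
    rw [hseg] at hnm
    have hs0 : '"' ∉ s0 := hnm s0 List.mem_cons_self
    have hrest : ∀ x ∈ rest, '"' ∉ x := fun x hx => hnm x (List.mem_cons_of_mem _ hx)
    simp only [List.getD_cons_zero, List.tail_cons]
    cases hp : pvSp ' ' s0 with
    | nil => exact absurd hp (pvSp_ne_nil _ _)
    | cons a t =>
      have hlast : PySem.List.pyGetD (a :: t) (-1) [] = (a :: t).getLast (by simp) :=
        PySem.List.pyGetD_neg_one (a :: t) [] (by simp)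
      rw [hlast]
      have hfold := pvBfold rest hrest false ((a :: t).getLast (by simp)) ((a :: t).dropLast)
      simp only at hfold ⊢
      rw [hfold]
      congr 1
      rw [← hq]
      have hout := pvRef_outside s0 hs0 ((rest.map (fun s => '"' :: s)).flatten) [] []
      rw [hp] at hout
      simp only [List.headD, List.tail, List.nil_append] at hout
      rw [hout, pvEmit_fold]
      simp

-- ===== VERDICT (by name: the statement is the Claim_ definition above) =====
theorem split_query_into_search_terms_spec : Claim_equal_split_query_into_search_terms := by
  intro query _
  unfold Spec_split_query_into_search_terms
  rw [pvA_eq_ref, pvB_eq_ref]
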